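-- pv_equiv track=rewrite | github.com/Zhenyu-Liang/Competitive-Programming | codeforces/Practices/800/999A.py | check
-- ===== SOURCE A (Python) =====
-- def check(n,m):
--     a=b=None
--     for i in range(len(n)):
--         if n[i]>m:
--             a=i
--             break
--     n=n[::-1]
--     for j in range(len(n)):
--         if n[j]>m:
--             b=(len(n)-1)-j
--             break
--     if a!=None and b!=None:
--         return abs(a-b)+1
--     elif a!=None or b!=None:
--         return 1
--     else:
--         return 0
-- ===== SOURCE B (Python) =====
-- def check(n, m):
--     idx = [i for i, x in enumerate(n) if x > m]
--     if idx:
--         return idx[-1] - idx[0] + 1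
--     return 0
-- ===== Notes on version B (the rewrite author's own statement) =====
-- stated objective: simpler
-- what changed: Replaces A's two boundary scans (forward scan plus a scan over the reversed list with index re-translation and a three-way None-case return) by one pass collecting the indices exceeding m and closed arithmetic idx[-1]-idx[0]+1.
import Mathlib
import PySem

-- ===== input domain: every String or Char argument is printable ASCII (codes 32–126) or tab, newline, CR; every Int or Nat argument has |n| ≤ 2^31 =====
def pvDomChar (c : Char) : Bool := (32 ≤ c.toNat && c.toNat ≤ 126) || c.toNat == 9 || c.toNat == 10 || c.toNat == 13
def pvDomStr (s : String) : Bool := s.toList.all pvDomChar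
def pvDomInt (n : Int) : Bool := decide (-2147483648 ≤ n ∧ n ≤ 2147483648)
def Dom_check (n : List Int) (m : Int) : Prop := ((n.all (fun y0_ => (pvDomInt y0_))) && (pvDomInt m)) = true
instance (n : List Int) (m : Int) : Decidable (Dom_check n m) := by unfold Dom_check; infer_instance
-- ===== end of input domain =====

-- B replaces A's two boundary scans (forward + over the reversed list) by one pass
-- collecting the exceeding indices and closed arithmetic on its first/last entry (objective: simpler).

-- ===== PORT A =====
-- the forward 'for i in range(len(n)): if n[i]>m: a=i; break' loop, as structural recursion
def checkFind : List Int → Int → Int → Option Int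
  | [], _, _ => none
  | x :: t, m, i => if x > m then some i else checkFind t m (i + 1)

def check (n : List Int) (m : Int) : Int :=
  let a : Option Int := checkFind n m 0
  -- n = n[::-1]
  let nr : List Int := (PySem.List.slice? n none none (-1)).getD []
  -- the second loop: first j with nr[j] > m, then b = (len(nr)-1) - j
  let b : Option Int :=
    match checkFind nr m 0 with
    | some j => some (((nr.length : Int) - 1) - j)
    | none => none
  match a, b with
  | some a, some b => |a - b| + 1   -- if a!=None and b!=None
  | some _, none => 1               -- elif a!=None or b!=None
  | none, some _ => 1
  | none, none => 0                 -- else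

-- ===== PORT B =====
def check_alt (n : List Int) (m : Int) : Int :=
  let idx : List Int :=
    ((PySem.List.enumerate n).filter (fun p => decide (p.2 > m))).map Prod.fst
  match idx with
  | [] => 0
  | i :: rest => (i :: rest).getLast (by simp) - i + 1

-- ===== PRECONDITION & SPEC =====
def Spec_check (n : List Int) (m : Int) (out : Int) : Prop := out = check_alt n m
instance (n : List Int) (m : Int) (out : Int) : Decidable (Spec_check n m out) := by unfold Spec_check; infer_instance

-- ===== CLAIM (what is proved, stated in full; the proofs are below) =====
def Claim_equal_check : Prop := ∀ (n : List Int) (m : Int), Dom_check n m → Spec_check n m (check n m)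

-- ===== LEMMAS AND PROOFS =====

/-- The list of indices (starting at k) whose element exceeds m. -/
def idxs (n : List Int) (m : Int) (k : Int) : List Int :=
  match n with
  | [] => []
  | x :: t => if x > m then k :: idxs t m (k + 1) else idxs t m (k + 1)

theorem idxs_eq_filter_enumerate (n : List Int) (m k : Int) :
    ((PySem.List.enumerate n k).filter (fun p => decide (p.2 > m))).map Prod.fst
      = idxs n m k := by
  induction n generalizing k with
  | nil => simp [idxs, PySem.List.enumerate_nil]
  | cons x t ih =>
    simp only [PySem.List.enumerate_cons, List.filter_cons, idxs]
    by_cases h : x > m <;> simp [h, ih]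

theorem checkFind_eq_head (n : List Int) (m k : Int) :
    checkFind n m k = (idxs n m k).head? := by
  induction n generalizing k with
  | nil => simp [checkFind, idxs]
  | cons x t ih =>
    simp only [checkFind, idxs]
    by_cases h : x > m <;> simp [h, ih]

theorem idxs_shift (n : List Int) (m k c : Int) :
    idxs n m (k + c) = (idxs n m k).map (· + c) := by
  induction n generalizing k with
  | nil => simp [idxs]
  | cons x t ih =>
    simp only [idxs]
    by_cases h : x > m
    · simp only [h, if_pos, List.map_cons]
      have : k + c + 1 = (k + 1) + c := by ring
      rw [this, ih]
    · have : k + c + 1 = (k + 1) + c := by ring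
      simp only [h, if_neg, not_false_iff]
      rw [this, ih]

theorem idxs_append (u v : List Int) (m k : Int) :
    idxs (u ++ v) m k = idxs u m k ++ idxs v m (k + u.length) := by
  induction u generalizing k with
  | nil => simp [idxs]
  | cons x t ih =>
    simp only [List.cons_append, idxs, List.length_cons]
    have hk : k + (↑t.length + 1) = (k + 1) + (t.length : Int) := by ring
    by_cases h : x > m <;> simp [h, ih, hk]

theorem idxs_reverse (n : List Int) (m : Int) :
    idxs n.reverse m 0
      = ((idxs n m 0).map (fun i => ((n.length : Int) - 1) - i)).reverse := by
  induction n with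
  | nil => simp [idxs]
  | cons x t ih =>
    rw [List.reverse_cons, idxs_append, ih]
    have hmap : (idxs t m (0 + 1)).map (fun i => (((x :: t).length : Int)) - 1 - i)
        = (idxs t m 0).map (fun i => ((t.length : Int)) - 1 - i) := by
      rw [idxs_shift t m 0 1, List.map_map]
      apply List.map_congr_left
      intro a _
      simp
      ring
    simp only [idxs, List.length_reverse, List.length_cons]
    by_cases h : x > m
    · simp only [h, if_pos, List.map_cons, List.reverse_cons]
      simp only [List.length_cons] at hmap
      rw [hmap]
      congr 1
      simp
    · simp only [h, if_neg, not_false_iff, List.append_nil]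
      simp only [List.length_cons] at hmap
      rw [hmap]

theorem idxs_ge (n : List Int) (m k : Int) : ∀ i ∈ idxs n m k, k ≤ i := by
  induction n generalizing k with
  | nil => simp [idxs]
  | cons x t ih =>
    intro i hi
    simp only [idxs] at hi
    by_cases h : x > m
    · rw [if_pos h] at hi
      rcases List.mem_cons.mp hi with rfl | hi
      · exact le_refl _
      · have := ih (k + 1) i hi; omega
    · rw [if_neg h] at hi
      have := ih (k + 1) i hi; omega

theorem idxs_head_le (n : List Int) (m k : Int) (i0 : Int) (r : List Int)
    (h : idxs n m k = i0 :: r) : ∀ i ∈ idxs n m k, i0 ≤ i := by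
  induction n generalizing k with
  | nil => simp [idxs] at h
  | cons x t ih =>
    simp only [idxs] at h ⊢
    by_cases hx : x > m
    · rw [if_pos hx] at h ⊢
      injection h with h1 h2
      subst h1
      intro i hi
      rcases List.mem_cons.mp hi with rfl | hi
      · exact le_refl _
      · have := idxs_ge t m (k + 1) i hi; omega
    · rw [if_neg hx] at h ⊢
      exact ih (k + 1) h

theorem check_alt_idxs (n : List Int) (m : Int) :
    check_alt n m = (match idxs n m 0 with
      | [] => 0
      | i :: rest => (i :: rest).getLast (by simp) - i + 1) := by
  unfold check_alt
  rw [show (PySem.List.enumerate n : List (Int × Int)) = PySem.List.enumerate n 0 from rfl,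
    idxs_eq_filter_enumerate]

-- ===== VERDICT (by name: the statement is the Claim_ definition above) =====
theorem check_spec : Claim_equal_check := by
  intro n m _
  unfold Spec_check
  rw [check_alt_idxs]
  unfold check
  rw [PySem.List.slice?_none_none_neg_one]
  simp only [Option.getD_some]
  rw [checkFind_eq_head n m 0, checkFind_eq_head n.reverse m 0, idxs_reverse]
  cases hx : idxs n m 0 with
  | nil => simp
  | cons i0 rest =>
    have hne : (i0 :: rest) ≠ [] := by simp
    have hle : i0 ≤ (i0 :: rest).getLast hne := by
      have := idxs_head_le n m 0 i0 rest hx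
      rw [hx] at this
      exact this _ (List.getLast_mem hne)
    rw [List.head?_reverse, List.getLast?_map, List.getLast?_eq_some_getLast hne]
    simp only [Option.map_some, List.head?_cons, List.length_reverse]
    have h1 : (n.length : Int) - 1 - ((n.length : Int) - 1 - (i0 :: rest).getLast hne)
        = (i0 :: rest).getLast hne := by ring
    rw [h1, abs_of_nonpos (by omega)]
    ring
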